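-- pv_equiv track=rewrite | github.com/giladfuchs/algo-expert-leet-code-soloution | leetcode/reductionOperations.py | reductionOperationsMy
-- ===== SOURCE A (Python) =====
-- from typing import List
--
-- def reductionOperationsMy(nums: List[int]) -> int:
--     nums.sort(reverse=True)
--     i = 0
--     n = len(nums)
--     count_add = len(set(nums)) - 1
--     count = 0
--
--     while i < n - 1:
--         if nums[i] != nums[i + 1]:
--             count += count_add
--             count_add -= 1
--         elif nums[i] != nums[-1]:
--             count += count_add
--
--         i += 1
--     return count
-- ===== SOURCE B (Python) =====
-- from typing import List
--
-- def reductionOperationsMy(nums: List[int]) -> int: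
--     # keep A's observable in-place mutation: sort descending
--     nums.sort(reverse=True)
--     total = 0
--     steps = 0
--     prev = None
--     for x in reversed(nums):  # ascending order
--         if prev is not None and x != prev:
--             steps += 1
--         total += steps
--         prev = x
--     return total
-- ===== Notes on version B (the rewrite author's own statement) =====
-- stated objective: simpler
-- what changed: Replaces A's decrementing count_add seeded by len(set(nums)) and its extra last-element duplicate check with a single ascending pass over the descending-sorted list that increments a distinct-rank counter at each value boundary and accumulates it, needing no set construction at all.
import Mathlib
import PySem

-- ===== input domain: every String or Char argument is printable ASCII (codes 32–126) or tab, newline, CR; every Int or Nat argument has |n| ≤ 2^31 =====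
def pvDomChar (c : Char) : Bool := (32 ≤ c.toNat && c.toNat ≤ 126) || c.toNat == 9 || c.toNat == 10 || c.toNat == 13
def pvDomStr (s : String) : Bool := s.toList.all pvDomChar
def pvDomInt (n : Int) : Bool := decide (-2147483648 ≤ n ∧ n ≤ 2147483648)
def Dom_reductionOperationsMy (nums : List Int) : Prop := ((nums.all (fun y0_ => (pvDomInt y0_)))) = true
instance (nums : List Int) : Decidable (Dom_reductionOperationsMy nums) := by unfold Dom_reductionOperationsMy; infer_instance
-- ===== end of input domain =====

-- B replaces A's decrementing count_add / len(set) / last-element duplicate check by one ascending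
-- pass with an incrementing distinct-rank counter (objective: simpler). In Python both A and B
-- sort the argument descending in place; the theorems are about the return value.

-- ===== PORT A =====
-- A's while loop, index recursion on fuel (fuel = len nums suffices: i starts at 0 and grows by 1
-- per iteration). Inside the loop body the indices i, i+1 and -1 are always in range, so pyGetD
-- with default 0 is exact there.
def aLoop (nums : List Int) (n : Int) : Nat → Int → Int → Int → Int
  | 0, _, _, count => count
  | fuel + 1, i, count_add, count =>
    if i < n - 1 then
      if PySem.List.pyGetD nums i 0 ≠ PySem.List.pyGetD nums (i + 1) 0 then
        aLoop nums n fuel (i + 1) (count_add - 1) (count + count_add)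
      else if PySem.List.pyGetD nums i 0 ≠ PySem.List.pyGetD nums (-1) 0 then
        aLoop nums n fuel (i + 1) count_add (count + count_add)
      else
        aLoop nums n fuel (i + 1) count_add count
    else count

def reductionOperationsMy (nums : List Int) : Int :=
  let nums := PySem.List.sorted nums (fun x => x) true
  let n : Int := nums.length
  let count_add : Int := ((PySem.Set.ofList nums).length : Int) - 1
  aLoop nums n nums.length 0 count_add 0

-- ===== PORT B =====
-- B's loop body; state = (total, steps, prev)
def bStep (st : Int × Int × Option Int) (x : Int) : Int × Int × Option Int :=
  let steps :=
    match st.2.2 with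
    | some p => if x ≠ p then st.2.1 + 1 else st.2.1
    | none => st.2.1
  (st.1 + steps, steps, some x)

def reductionOperationsMy_alt (nums : List Int) : Int :=
  let nums := PySem.List.sorted nums (fun x => x) true
  (nums.reverse.foldl bStep (0, 0, none)).1

-- ===== PRECONDITION & SPEC =====
def Spec_reductionOperationsMy (nums : List Int) (out : Int) : Prop := out = reductionOperationsMy_alt nums
instance (nums : List Int) (out : Int) : Decidable (Spec_reductionOperationsMy nums out) := by unfold Spec_reductionOperationsMy; infer_instance

-- ===== CLAIM (what is proved, stated in full; the proofs are below) =====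
def Claim_equal_reductionOperationsMy : Prop := ∀ (nums : List Int), Dom_reductionOperationsMy nums → Spec_reductionOperationsMy nums (reductionOperationsMy nums)

-- ===== LEMMAS AND PROOFS =====

-- number of adjacent boundaries (indices i with l[i] ≠ l[i+1])
def bnd : List Int → Int
  | x :: y :: rest => (if x = y then 0 else 1) + bnd (y :: rest)
  | _ => 0

-- common closed form: Σ over positions of "number of boundaries at or after that position"
def hsum : List Int → Int
  | [] => 0
  | x :: t => bnd (x :: t) + hsum t

-- structural version of A's index loop (mn = nums[-1])
def loopA (mn : Int) : List Int → Int → Int → Int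
  | x :: y :: rest, c, acc =>
    if x ≠ y then loopA mn (y :: rest) (c - 1) (acc + c)
    else if x ≠ mn then loopA mn (y :: rest) c (acc + c)
    else loopA mn (y :: rest) c acc
  | _, _, acc => acc

theorem bnd_nonneg : ∀ l : List Int, 0 ≤ bnd l := by
  intro l
  induction l with
  | nil => simp [bnd]
  | cons x t ih =>
    cases t with
    | nil => simp [bnd]
    | cons y r => simp only [bnd] at *; split <;> omega

-- B's fold computes (hsum, bnd, head?) — no sortedness needed
theorem bStep_state : ∀ l : List Int,
    l.reverse.foldl bStep (0, 0, none) = (hsum l, bnd l, l.head?) := by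
  intro l
  induction l with
  | nil => simp [hsum, bnd]
  | cons x t ih =>
    have hrev : (x :: t).reverse = t.reverse ++ [x] := by simp
    rw [hrev, List.foldl_append, ih]
    cases t with
    | nil => simp [bStep, hsum, bnd]
    | cons y r =>
      simp only [bStep, List.head?, hsum, bnd]
      by_cases h : x = y <;> simp [bStep, h] <;> ring_nf <;> simp

theorem loopA_acc (mn : Int) : ∀ (l : List Int) (c acc : Int),
    loopA mn l c acc = acc + loopA mn l c 0 := by
  intro l
  induction l with
  | nil => intro c acc; simp [loopA]
  | cons x t ih =>
    intro c acc
    cases t with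
    | nil => simp [loopA]
    | cons y r =>
      simp only [loopA]
      split_ifs with h1 h2
      · rw [ih (c - 1) (acc + c), ih (c - 1) (0 + c)]; ring
      · rw [ih c (acc + c), ih c (0 + c)]; ring
      · exact ih c acc

theorem bnd_zero_head_last : ∀ (l : List Int) (h : l ≠ []), bnd l = 0 →
    l.head h = l.getLast h := by
  intro l
  induction l with
  | nil => intro h; exact absurd rfl h
  | cons x t ih =>
    intro h hb
    cases t with
    | nil => rfl
    | cons y r =>
      have h0 := bnd_nonneg (y :: r)
      have hxy : x = y := by
        by_cases hxy : x = y
        · exact hxy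
        · simp only [bnd, if_neg hxy] at hb; omega
      have hb2 : bnd (y :: r) = 0 := by simp only [bnd, if_pos hxy] at hb; omega
      have htl := ih (by simp) hb2
      simp only [List.head] at htl ⊢
      rw [List.getLast_cons (by simp), hxy]
      exact htl

theorem head_ne_last_of_bnd_pos : ∀ (l : List Int),
    l.Pairwise (fun a b => b ≤ a) → ∀ (h : l ≠ []), bnd l ≠ 0 →
    l.head h ≠ l.getLast h := by
  intro l
  induction l with
  | nil => intro _ h; exact absurd rfl h
  | cons x t ih =>
    intro hp h hb
    cases t with
    | nil => simp [bnd] at hb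
    | cons y r =>
      have hpt : (y :: r).Pairwise (fun a b : Int => b ≤ a) := (List.pairwise_cons.mp hp).2
      have hall : ∀ z ∈ y :: r, z ≤ x := (List.pairwise_cons.mp hp).1
      rw [List.getLast_cons (by simp)]
      by_cases hxy : x = y
      · have hb2 : bnd (y :: r) ≠ 0 := by
          simp only [bnd, if_pos hxy] at hb; simpa using hb
        have htl := ih hpt (by simp) hb2
        simp only [List.head] at htl ⊢
        rw [hxy]; exact htl
      · have hyx : y < x := lt_of_le_of_ne (hall y (by simp)) (fun e => hxy e.symm)
        have hlast_mem : (y :: r).getLast (by simp) ∈ y :: r := List.getLast_mem _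
        have hly : (y :: r).getLast (by simp) ≤ y := by
          rcases List.mem_cons.mp hlast_mem with e | e
          · exact le_of_eq e
          · exact (List.pairwise_cons.mp hpt).1 _ e
        simp only [List.head]
        omega

-- A's structural loop, started at count_add = bnd l, computes hsum l on a descending list
theorem loopA_main : ∀ (l : List Int),
    l.Pairwise (fun a b => b ≤ a) → ∀ (h : l ≠ []),
    loopA (l.getLast h) l (bnd l) 0 = hsum l := by
  intro l
  induction l with
  | nil => intro _ h; exact absurd rfl h
  | cons x t ih =>
    intro hp h
    cases t with
    | nil => simp [loopA, hsum, bnd]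
    | cons y r =>
      have hpt : (y :: r).Pairwise (fun a b : Int => b ≤ a) := (List.pairwise_cons.mp hp).2
      have hlast : (x :: y :: r).getLast h = (y :: r).getLast (by simp) :=
        List.getLast_cons (by simp)
      have hihm := ih hpt (by simp)
      by_cases hxy : x = y
      · have hbeq : bnd (x :: y :: r) = bnd (y :: r) := by
          simp only [bnd, if_pos hxy]; ring
        by_cases hb0 : bnd (y :: r) = 0
        · -- all elements equal: x = nums[-1], third (silent) branch
          have hhl := bnd_zero_head_last (y :: r) (by simp) hb0
          have hxmn : x = (x :: y :: r).getLast h := by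
            rw [hlast, hxy]; simpa [List.head] using hhl
          simp only [loopA, if_neg (show ¬ x ≠ y by simpa using hxy),
            if_neg (show ¬ x ≠ (x :: y :: r).getLast h by simpa using hxmn)]
          rw [hbeq, hlast, hihm]
          simp [hsum, hbeq, hb0]
        · -- x equals next but not the minimum: second branch
          have hne : x ≠ (x :: y :: r).getLast h := by
            rw [hlast, hxy]
            have := head_ne_last_of_bnd_pos (y :: r) hpt (by simp) hb0
            simpa [List.head] using this
          simp only [loopA, if_neg (show ¬ x ≠ y by simpa using hxy), if_pos hne]
          rw [loopA_acc, hbeq, hlast, hihm]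
          simp only [hsum]
          rw [hbeq]; ring
      · -- boundary: first branch
        have hbeq : bnd (x :: y :: r) = 1 + bnd (y :: r) := by
          simp only [bnd, if_neg hxy]
        simp only [loopA, if_pos hxy]
        rw [loopA_acc, show bnd (x :: y :: r) - 1 = bnd (y :: r) by omega, hlast, hihm]
        simp only [hsum]
        rw [hbeq]; ring

-- bridge: the fuel/index loop of port A is loopA on the dropped suffix
theorem aLoop_eq : ∀ (s : List Int) (fuel k : Nat) (c acc : Int),
    s.length ≤ k + fuel →
    aLoop s (s.length : Int) fuel (k : Int) c acc
      = loopA (PySem.List.pyGetD s (-1) 0) (s.drop k) c acc := by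
  intro s fuel
  induction fuel with
  | zero =>
    intro k c acc hle
    rw [List.drop_eq_nil_of_le (by omega)]
    simp [aLoop, loopA]
  | succ fuel ih =>
    intro k c acc hle
    simp only [aLoop]
    by_cases hk : (k : Int) < (s.length : Int) - 1
    · have hk1 : k + 1 < s.length := by omega
      have hk0 : k < s.length := by omega
      have hg0 : PySem.List.pyGetD s (k : Int) 0 = s[k] := by
        rw [PySem.List.pyGetD_natCast]; exact List.getD_eq_getElem s 0 hk0
      have hg1 : PySem.List.pyGetD s ((k : Int) + 1) 0 = s[k + 1] := by
        rw [show ((k : Int) + 1) = ((k + 1 : Nat) : Int) by push_cast; ring,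
          PySem.List.pyGetD_natCast]
        exact List.getD_eq_getElem s 0 hk1
      have hdrop : s.drop k = s[k] :: s.drop (k + 1) := List.drop_eq_getElem_cons hk0
      have hdrop1 : s.drop (k + 1) = s[k + 1] :: s.drop (k + 2) := List.drop_eq_getElem_cons hk1
      rw [if_pos hk, hg0, hg1, hdrop, hdrop1]
      simp only [loopA]
      rw [← hdrop1]
      have hcast : (k : Int) + 1 = ((k + 1 : Nat) : Int) := by push_cast; ring
      split_ifs with h1 h2
      · rw [hcast, ih (k + 1) _ _ (by omega)]
      · rw [hcast, ih (k + 1) _ _ (by omega)]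
      · rw [hcast, ih (k + 1) _ _ (by omega)]
    · rw [if_neg hk]
      have hlen : s.length ≤ k + 1 := by omega
      rcases hd : s.drop k with _ | ⟨a, t⟩
      · simp [loopA]
      · have : (s.drop k).length = s.length - k := List.length_drop ..
        rw [hd] at this
        cases t with
        | nil => simp [loopA]
        | cons b u => simp at this; omega

-- len(set(l)) = card of the finset of l
theorem card_ofList (l : List Int) : (PySem.Set.ofList l).length = l.toFinset.card := by
  rw [← List.toFinset_card_of_nodup (PySem.Set.nodup_ofList (xs := l))]
  congr 1
  ext a
  simp [PySem.Set.mem_ofList]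

-- on a descending list, #distinct = #boundaries + 1
theorem distinct_eq_bnd : ∀ l : List Int,
    l.Pairwise (fun a b => b ≤ a) → l ≠ [] →
    (l.toFinset.card : Int) = bnd l + 1 := by
  intro l
  induction l with
  | nil => intro _ h; exact absurd rfl h
  | cons x t ih =>
    intro hp _
    cases t with
    | nil => simp [bnd]
    | cons y r =>
      have hpt : (y :: r).Pairwise (fun a b : Int => b ≤ a) := (List.pairwise_cons.mp hp).2
      have hall : ∀ z ∈ y :: r, z ≤ x := (List.pairwise_cons.mp hp).1
      have hiht := ih hpt (by simp)
      by_cases hxy : x = y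
      · have hmem : x ∈ (y :: r).toFinset := by simp [hxy]
        rw [List.toFinset_cons, Finset.insert_eq_self.mpr hmem]
        rw [hiht]
        simp [bnd, hxy]
      · have hnm : x ∉ (y :: r).toFinset := by
          simp only [List.mem_toFinset]
          intro hmem
          have hle : x ≤ y := by
            rcases List.mem_cons.mp hmem with e | e
            · exact le_of_eq e
            · exact (List.pairwise_cons.mp hpt).1 _ e
          exact hxy (le_antisymm hle (hall y (by simp)))
        rw [List.toFinset_cons, Finset.card_insert_of_notMem hnm]
        push_cast
        rw [hiht]
        simp only [bnd, if_neg hxy]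
        ring

-- ===== VERDICT (by name: the statement is the Claim_ definition above) =====
theorem reductionOperationsMy_spec : Claim_equal_reductionOperationsMy := by
  unfold Claim_equal_reductionOperationsMy
  intro nums _
  unfold Spec_reductionOperationsMy reductionOperationsMy reductionOperationsMy_alt
  dsimp only
  set s := PySem.List.sorted nums (fun x => x) true with hs
  rcases hnil : s with _ | ⟨a, t⟩
  · simp [aLoop, bStep_state, hsum]
  · rw [← hnil]
    have hne : s ≠ [] := by rw [hnil]; exact List.cons_ne_nil _ _
    have hp : s.Pairwise (fun a b => b ≤ a) := by
      have := PySem.List.sorted_pairwise_rev (xs := nums) (key := fun x => x)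
      simpa [hs] using this
    have hmn : PySem.List.pyGetD s (-1) 0 = s.getLast hne :=
      PySem.List.pyGetD_neg_one s 0 hne
    have hcard : ((PySem.Set.ofList s).length : Int) - 1 = bnd s := by
      rw [card_ofList]
      have := distinct_eq_bnd s hp hne
      omega
    have hbridge := aLoop_eq s s.length 0 (((PySem.Set.ofList s).length : Int) - 1) 0
      (by omega)
    rw [bStep_state]
    simp only [Nat.cast_zero] at hbridge
    rw [hbridge, List.drop_zero, hmn, hcard, loopA_main s hp hne]
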